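-- pv_equiv track=rewrite | github.com/molpro/pymolpro | pymolpro/defbas.py | element_ranges
-- ===== SOURCE A (Python) =====
-- periodic_table = [
--     "H", "He",
--     "Li", "Be", "B", "C", "N", "O", "F", "Ne",
--     "Na", "Mg", "Al", "Si", "P", "S", "Cl", "Ar",
--     "K", "Ca", "Sc", "Ti", "V", "Cr", "Mn", "Fe", "Co", "Ni",
--     "Cu", "Zn", "Ga", "Ge", "As", "Se", "Br", "Kr",
--     "Rb", "Sr", "Y", "Zr", "Nb", "Mo", "Tc", "Ru", "Rh", "Pd",
--     "Ag", "Cd", "In", "Sn", "Sb", "Te", "I", "Xe",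
--     "Cs", "Ba",
--     "La", "Ce", "Pr", "Nd", "Pm", "Sm", "Eu", "Gd", "Tb",
--     "Dy", "Ho", "Er", "Tm", "Yb",
--     "Lu", "Hf", "Ta", "W", "Re", "Os", "Ir", "Pt",
--     "Au", "Hg", "Tl", "Pb", "Bi", "Po", "At", "Rn",
--     "Fr", "Ra", "Ac", "Th", "Pa", "U", "Np", "Pu",
--     "Am", "Cm", "Bk", "Cf", "Es", "Fm", "Md", "No", "Lr",
--     "Rf", "Db", "Sg", "Bh", "Hs", "Mt", "Ds", "Rg", "Cn",
--     "Nh", "Fl", "Mc", "Lv", "Ts", "Og",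
--     "Ua", "Ub", "Uc", "Ud", "Ue", "Uf", "Ug", "Uh",
-- ]
--
-- small_core_ranges = [
--     (1, 4),
--     (11, 12),
--     (19, 30),
--     (37, 48),
--     (55, 80),
--     (87, 112),
-- ]
--
-- def element(given) -> str:
--     """
--     Return the properly-cased chemical element symbol corresponding to a given atomic number or case-insensitive chemical element symbol
--     """
--     if isinstance(given, str):
--         return given[0].upper() + given[1:].lower()
--     elif type(given) is int:
--         return periodic_table[given - 1]
--     else:
--         raise ValueError
--
-- def atomic_number(given) -> int:
--     """
--     Return the atomic number corresponding to a given chemical element symbol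
--     """
--     if type(given) is int:
--         return given
--     elif isinstance(given, str):
--         return periodic_table.index(element(given)) + 1
--     else:
--         raise ValueError
--
-- def core_correlation_segment(element):
--     z = atomic_number(element)
--     core_correlation_boundaries = ([range[0] - 1 for range in small_core_ranges] + [range[1] for range in
--                                                                                     small_core_ranges]) + [9999]
--     core_correlation_boundaries.sort()
--     for segment in range(len(core_correlation_boundaries) - 1):
--         if z > core_correlation_boundaries[segment] and z <= core_correlation_boundaries[segment + 1]:
--             return segment
--
-- def element_ranges(elements: list, heavy: bool = True, light: bool = True) -> list[str]:
--     """
--     Format a list of chemical elements into ranges of contiguous elements not spanning a core-correlation segment boundary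
--     :param elements: Atomic numbers or chemical element symbols
--     :param heavy: Whether to include 'heavy' elements, ie those for which core correlation is active in the mixed core-correlation scheme
--     :param light: Whether to include 'light' elements, ie those for which core correlation is not active in the mixed core-correlation scheme
--     """
--     result = []
--     this = []
--     atomic_numbers = list(set([atomic_number(element) for element in elements]))
--     atomic_numbers.sort()
--     for k, atno in enumerate(atomic_numbers):
--         if (heavy and core_correlation_segment(atno) % 2 == 0) or (light and core_correlation_segment(atno) % 2 == 1):
--             if this and (core_correlation_segment(atno) != core_correlation_segment(this[-1]) or atno != this[-1] + 1):
--                 result.append(element(this[0]) + ('-' + element(this[-1]) if len(this) > 1 else ''))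
--                 this = []
--             this.append(atno)
--     if this:
--         result.append(element(this[0]) + ('-' + element(this[-1]) if len(this) > 1 else ''))
--     return result
-- ===== SOURCE B (Python) =====
-- periodic_table = [
--     "H", "He",
--     "Li", "Be", "B", "C", "N", "O", "F", "Ne",
--     "Na", "Mg", "Al", "Si", "P", "S", "Cl", "Ar",
--     "K", "Ca", "Sc", "Ti", "V", "Cr", "Mn", "Fe", "Co", "Ni",
--     "Cu", "Zn", "Ga", "Ge", "As", "Se", "Br", "Kr",
--     "Rb", "Sr", "Y", "Zr", "Nb", "Mo", "Tc", "Ru", "Rh", "Pd",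
--     "Ag", "Cd", "In", "Sn", "Sb", "Te", "I", "Xe",
--     "Cs", "Ba",
--     "La", "Ce", "Pr", "Nd", "Pm", "Sm", "Eu", "Gd", "Tb",
--     "Dy", "Ho", "Er", "Tm", "Yb",
--     "Lu", "Hf", "Ta", "W", "Re", "Os", "Ir", "Pt",
--     "Au", "Hg", "Tl", "Pb", "Bi", "Po", "At", "Rn",
--     "Fr", "Ra", "Ac", "Th", "Pa", "U", "Np", "Pu",
--     "Am", "Cm", "Bk", "Cf", "Es", "Fm", "Md", "No", "Lr",
--     "Rf", "Db", "Sg", "Bh", "Hs", "Mt", "Ds", "Rg", "Cn",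
--     "Nh", "Fl", "Mc", "Lv", "Ts", "Og",
--     "Ua", "Ub", "Uc", "Ud", "Ue", "Uf", "Ug", "Uh",
-- ]
--
-- small_core_ranges = [
--     (1, 4),
--     (11, 12),
--     (19, 30),
--     (37, 48),
--     (55, 80),
--     (87, 112),
-- ]
--
-- def element(given) -> str:
--     if isinstance(given, str):
--         return given[0].upper() + given[1:].lower()
--     elif type(given) is int:
--         return periodic_table[given - 1]
--     else:
--         raise ValueError
--
-- def atomic_number(given) -> int:
--     if type(given) is int:
--         return given
--     elif isinstance(given, str):
--         return periodic_table.index(element(given)) + 1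
--     else:
--         raise ValueError
--
-- def core_correlation_segment(element):
--     z = atomic_number(element)
--     core_correlation_boundaries = ([range[0] - 1 for range in small_core_ranges] + [range[1] for range in
--                                                                                     small_core_ranges]) + [9999]
--     core_correlation_boundaries.sort()
--     for segment in range(len(core_correlation_boundaries) - 1):
--         if z > core_correlation_boundaries[segment] and z <= core_correlation_boundaries[segment + 1]:
--             return segment
--
-- def element_ranges(elements: list, heavy: bool = True, light: bool = True) -> list:
--     """Filter first, then group maximal consecutive runs within a segment."""
--     def included(z):
--         s = core_correlation_segment(z)
--         return (heavy and s % 2 == 0) or (light and s % 2 == 1)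
--
--     zs = [z for z in sorted({atomic_number(e) for e in elements}) if included(z)]
--
--     def groups(run):
--         if not run:
--             return []
--         hi, rest = run[0], run[1:]
--         while rest and rest[0] == hi + 1 and core_correlation_segment(rest[0]) == core_correlation_segment(hi):
--             hi, rest = rest[0], rest[1:]
--         fmt = element(run[0]) if run[0] == hi else element(run[0]) + '-' + element(hi)
--         return [fmt] + groups(rest)
--
--     return groups(zs)
-- ===== Notes on version B (the rewrite author's own statement) =====
-- stated objective: alternative
-- what changed: A threads a flush-on-break buffer list `this` through one loop that also applies the heavy/light filter inline; B filters the sorted deduplicated atomic numbers first and then emits maximal consecutive same-segment runs by extending each run's endpoint directly, with no buffer list.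
import Mathlib
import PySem

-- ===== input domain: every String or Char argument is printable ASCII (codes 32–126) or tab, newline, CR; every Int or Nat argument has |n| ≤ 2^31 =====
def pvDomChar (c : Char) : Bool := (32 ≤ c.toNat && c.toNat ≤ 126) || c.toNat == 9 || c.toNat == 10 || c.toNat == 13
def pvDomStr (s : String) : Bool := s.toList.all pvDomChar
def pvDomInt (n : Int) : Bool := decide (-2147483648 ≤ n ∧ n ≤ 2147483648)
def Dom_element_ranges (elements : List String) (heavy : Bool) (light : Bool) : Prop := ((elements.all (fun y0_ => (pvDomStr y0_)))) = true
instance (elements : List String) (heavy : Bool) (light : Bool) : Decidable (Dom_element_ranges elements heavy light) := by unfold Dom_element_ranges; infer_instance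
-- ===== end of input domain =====

-- B replaces A's flush-buffer accumulator loop by filter-first then maximal-run grouping (alternative decomposition, same cost).

-- ===== PORT A =====
def periodic_table : List String := [
  "H", "He",
  "Li", "Be", "B", "C", "N", "O", "F", "Ne",
  "Na", "Mg", "Al", "Si", "P", "S", "Cl", "Ar",
  "K", "Ca", "Sc", "Ti", "V", "Cr", "Mn", "Fe", "Co", "Ni",
  "Cu", "Zn", "Ga", "Ge", "As", "Se", "Br", "Kr",
  "Rb", "Sr", "Y", "Zr", "Nb", "Mo", "Tc", "Ru", "Rh", "Pd",
  "Ag", "Cd", "In", "Sn", "Sb", "Te", "I", "Xe",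
  "Cs", "Ba",
  "La", "Ce", "Pr", "Nd", "Pm", "Sm", "Eu", "Gd", "Tb",
  "Dy", "Ho", "Er", "Tm", "Yb",
  "Lu", "Hf", "Ta", "W", "Re", "Os", "Ir", "Pt",
  "Au", "Hg", "Tl", "Pb", "Bi", "Po", "At", "Rn",
  "Fr", "Ra", "Ac", "Th", "Pa", "U", "Np", "Pu",
  "Am", "Cm", "Bk", "Cf", "Es", "Fm", "Md", "No", "Lr",
  "Rf", "Db", "Sg", "Bh", "Hs", "Mt", "Ds", "Rg", "Cn",
  "Nh", "Fl", "Mc", "Lv", "Ts", "Og",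
  "Ua", "Ub", "Uc", "Ud", "Ue", "Uf", "Ug", "Uh"]

def small_core_ranges : List (Int × Int) :=
  [(1, 4), (11, 12), (19, 30), (37, 48), (55, 80), (87, 112)]

-- element() on a string argument; none = IndexError on ""
def pyElement? (s : String) : Option String :=
  match s.toList with
  | [] => none
  | c :: rest => some (String.ofList (PySem.Chars.upperChar c :: PySem.Chars.lower rest))

-- element() on an int argument: periodic_table[z-1]; .getD "" exact here since every z this
-- file feeds it is a 1-based index into periodic_table (z = index+1)
def pyElementInt (z : Int) : String :=
  (PySem.List.pyGet? periodic_table (z - 1)).getD ""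

-- atomic_number() on a string; none = IndexError/ValueError of the Python
def atomic_number? (s : String) : Option Int :=
  (pyElement? s).bind fun e => (PySem.List.index? periodic_table e).map (fun k => (k : Int) + 1)

def core_correlation_boundaries : List Int :=
  PySem.List.sorted
    ((small_core_ranges.map (fun r => r.1 - 1) ++ small_core_ranges.map (fun r => r.2)) ++ [9999])
    (fun x => x) false

-- the for-loop with early return; none = the Python's implicit None (unreachable for 1 ≤ z ≤ 9999)
def core_correlation_segment (z : Int) : Option Int :=
  (PySem.List.pyRange 0 ((core_correlation_boundaries.length : Int) - 1) 1).findSome? fun seg =>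
    if PySem.List.pyGetD core_correlation_boundaries seg 0 < z ∧
        z ≤ PySem.List.pyGetD core_correlation_boundaries (seg + 1) 0 then some seg else none

-- result.append(element(this[0]) + ('-' + element(this[-1]) if len(this) > 1 else ''))
-- (.getD 0 exact: the Python only reaches this with `this` nonempty)
def emitRun (this : List Int) : String :=
  pyElementInt ((PySem.List.pyGet? this 0).getD 0) ++
    (if this.length > 1 then "-" ++ pyElementInt ((PySem.List.pyGet? this (-1)).getD 0) else "")

-- the for-loop of A, with the trailing `if this:` flush at the base case
def eraLoop (heavy light : Bool) (xs : List Int) (res : List String) (this : List Int) : List String :=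
  match xs with
  | [] => if this.isEmpty then res else res ++ [emitRun this]
  | atno :: rest =>
    if (heavy && PySem.Int.mod ((core_correlation_segment atno).getD 0) 2 == 0) ||
        (light && PySem.Int.mod ((core_correlation_segment atno).getD 0) 2 == 1) then
      let lastv := (PySem.List.pyGet? this (-1)).getD 0
      if !this.isEmpty &&
          (core_correlation_segment atno != core_correlation_segment lastv || atno != lastv + 1) then
        eraLoop heavy light rest (res ++ [emitRun this]) [atno]
      else
        eraLoop heavy light rest res (this ++ [atno])
    else eraLoop heavy light rest res this

def element_ranges (elements : List String) (heavy : Bool) (light : Bool) : List String :=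
  match elements.mapM atomic_number? with
  | none => []   -- the Python raised (unknown symbol / empty string); outside Pre_
  | some ans =>
    let atomic_numbers := PySem.List.sorted (PySem.Set.ofList ans) (fun x => x) false
    eraLoop heavy light atomic_numbers [] []

-- ===== PORT B =====
def includedB (heavy light : Bool) (z : Int) : Bool :=
  (heavy && PySem.Int.mod ((core_correlation_segment z).getD 0) 2 == 0) ||
    (light && PySem.Int.mod ((core_correlation_segment z).getD 0) 2 == 1)

-- the inner while of Source B's groups(): extend hi while the next number continues the run
def extendRun (hi : Int) (rest : List Int) : Int × List Int :=
  match rest with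
  | [] => (hi, [])
  | a :: t =>
    if a == hi + 1 && core_correlation_segment a == core_correlation_segment hi then extendRun a t
    else (hi, a :: t)

theorem extendRun_len (hi : Int) (rest : List Int) : (extendRun hi rest).2.length ≤ rest.length := by
  induction rest generalizing hi with
  | nil => simp [extendRun]
  | cons a t ih =>
    simp only [extendRun]
    split
    · exact le_trans (ih a) (Nat.le_succ _)
    · simp

def groupsB (run : List Int) : List String :=
  match run with
  | [] => []
  | lo :: rest =>
    (if lo == (extendRun lo rest).1 then pyElementInt lo
     else pyElementInt lo ++ "-" ++ pyElementInt (extendRun lo rest).1) :: groupsB (extendRun lo rest).2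
termination_by run.length
decreasing_by simpa using Nat.lt_succ_of_le (extendRun_len lo rest)

def element_ranges_alt (elements : List String) (heavy : Bool) (light : Bool) : List String :=
  match elements.mapM atomic_number? with
  | none => []   -- the Python raised; outside Pre_
  | some ans =>
    groupsB ((PySem.List.sorted (PySem.Set.ofList ans) (fun x => x) false).filter (includedB heavy light))

-- ===== PRECONDITION & SPEC =====
-- Pre_: every given symbol is a non-empty string naming a known element (else Python A raises
-- IndexError on "" or ValueError from periodic_table.index)
def Pre_element_ranges (elements : List String) (heavy : Bool) (light : Bool) : Prop :=
  (elements.all fun s => ((pyElement? s).map (fun e => periodic_table.contains e)).getD false) = true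
instance (elements : List String) (heavy : Bool) (light : Bool) : Decidable (Pre_element_ranges elements heavy light) := by unfold Pre_element_ranges; infer_instance

def pvWitness_element_ranges : List String × Bool × Bool := (["H", "he", "C"], true, true)

def Spec_element_ranges (elements : List String) (heavy : Bool) (light : Bool) (out : List String) : Prop := out = element_ranges_alt elements heavy light
instance (elements : List String) (heavy : Bool) (light : Bool) (out : List String) : Decidable (Spec_element_ranges elements heavy light out) := by unfold Spec_element_ranges; infer_instance

-- ===== CLAIM (what is proved, stated in full; the proofs are below) =====
def Claim_equal_element_ranges : Prop := ∀ (elements : List String) (heavy : Bool) (light : Bool), Dom_element_ranges elements heavy light → Pre_element_ranges elements heavy light → Spec_element_ranges elements heavy light (element_ranges elements heavy light)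

-- ===== LEMMAS AND PROOFS =====

-- proof-side copy of A's loop with the include-filter already applied (unconditional body)
def loop2 (xs : List Int) (res : List String) (this : List Int) : List String :=
  match xs with
  | [] => if this.isEmpty then res else res ++ [emitRun this]
  | atno :: rest =>
    let lastv := (PySem.List.pyGet? this (-1)).getD 0
    if !this.isEmpty &&
        (core_correlation_segment atno != core_correlation_segment lastv || atno != lastv + 1) then
      loop2 rest (res ++ [emitRun this]) [atno]
    else
      loop2 rest res (this ++ [atno])

theorem eraLoop_eq_loop2 (heavy light : Bool) (xs : List Int) (res : List String) (this : List Int) :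
    eraLoop heavy light xs res this = loop2 (xs.filter (includedB heavy light)) res this := by
  induction xs generalizing res this with
  | nil => rfl
  | cons a rest ih =>
    by_cases h : includedB heavy light a = true
    · have h' := h
      unfold includedB at h'
      simp only [eraLoop, h', if_pos, List.filter_cons, h, loop2]
      split <;> exact ih _ _
    · have h' : ¬ ((heavy && PySem.Int.mod ((core_correlation_segment a).getD 0) 2 == 0) ||
          (light && PySem.Int.mod ((core_correlation_segment a).getD 0) 2 == 1)) = true := by
        unfold includedB at h; exact h
      simp only [eraLoop, h', List.filter_cons, h]
      simpa using ih res this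

theorem pyGet_neg_one_of_getLast (l : List Int) (hi : Int) (h : l.getLast? = some hi) :
    (PySem.List.pyGet? l (-1)).getD 0 = hi := by
  have hne : l ≠ [] := by intro he; simp [he] at h
  have hlen : 1 ≤ l.length := List.length_pos_of_ne_nil hne
  rw [PySem.List.pyGet?_neg_ofNat l 1 (by omega) (by omega)]
  rw [List.getLast?_eq_getElem?] at h
  simp [h]

-- the loop invariant: `this` is a nonempty buffer whose head is lo, last is hi,
-- lo ≤ hi, and it is a singleton exactly when lo = hi
def RunInv (this : List Int) (lo hi : Int) : Prop :=
  this.head? = some lo ∧ this.getLast? = some hi ∧ lo ≤ hi ∧ (this.length = 1 ↔ lo = hi)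

theorem emitRun_eq_fmt (this : List Int) (lo hi : Int) (h : RunInv this lo hi) :
    emitRun this =
      (if lo == hi then pyElementInt lo else pyElementInt lo ++ "-" ++ pyElementInt hi) := by
  obtain ⟨h1, h2, _, h4⟩ := h
  cases this with
  | nil => simp at h1
  | cons c t =>
    have hc : c = lo := by simpa using h1
    have h0 : (PySem.List.pyGet? (c :: t) 0).getD 0 = c := by
      simp [PySem.List.pyGet?, PySem.List.pyIdx?]
    unfold emitRun
    rw [h0, pyGet_neg_one_of_getLast _ hi h2, hc]
    by_cases hlh : lo = hi
    · have ht : t = [] := by have := h4.mpr hlh; simpa using this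
      subst ht
      simp [hlh]
    · have ht : t ≠ [] := fun he => hlh (h4.mp (by simp [he]))
      have hgt : (lo :: t).length > 1 := by
        cases t with | nil => exact absurd rfl ht | cons x xs => simp
      rw [if_pos hgt, if_neg (by simpa using hlh)]
      simp [String.append_assoc]

theorem loop2_run (rest : List Int) (res : List String) (lo hi : Int) (this : List Int)
    (h : RunInv this lo hi) :
    loop2 rest res this =
      res ++ (if lo == (extendRun hi rest).1 then pyElementInt lo
              else pyElementInt lo ++ "-" ++ pyElementInt (extendRun hi rest).1)
          :: groupsB (extendRun hi rest).2 := by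
  induction rest generalizing res lo hi this with
  | nil =>
    have hne : this ≠ [] := by intro he; rw [he] at h; simp [RunInv] at h
    have hie : this.isEmpty = false := by simpa using hne
    simp only [loop2, hie, Bool.false_eq_true, if_false, extendRun]
    rw [emitRun_eq_fmt this lo hi h]
    simp [groupsB]
  | cons a rest ih =>
    obtain ⟨h1, h2, h3, h4⟩ := h
    have hne : this ≠ [] := by intro he; rw [he] at h1; simp at h1
    have hlast : (PySem.List.pyGet? this (-1)).getD 0 = hi := pyGet_neg_one_of_getLast _ hi h2
    simp only [loop2, hlast]
    by_cases hcont : (a == hi + 1 && core_correlation_segment a == core_correlation_segment hi) = true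
    · -- run continues
      obtain ⟨ha, hseg⟩ : a = hi + 1 ∧ core_correlation_segment a = core_correlation_segment hi := by
        simpa [Bool.and_eq_true, beq_iff_eq] using hcont
      have hseg' : core_correlation_segment (hi + 1) = core_correlation_segment hi := ha ▸ hseg
      have hext : extendRun hi (a :: rest) = extendRun a rest := by simp [extendRun, hcont]
      have hcnd : (!this.isEmpty &&
          (core_correlation_segment a != core_correlation_segment hi || a != hi + 1)) = false := by
        simp [ha, hseg']
      rw [hcnd, if_neg Bool.false_ne_true]
      have hinv : RunInv (this ++ [a]) lo a := by
        refine ⟨?_, by simp, by omega, ?_⟩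
        · cases this with
          | nil => exact absurd rfl hne
          | cons c t => simpa using h1
        · constructor
          · intro hl
            have he : this = [] := by
              cases this with
              | nil => rfl
              | cons c t => simp at hl
            exact absurd he hne
          · intro hl; omega
      rw [ih _ _ _ _ hinv, hext]
    · -- run breaks
      have hcf : (a == hi + 1 && core_correlation_segment a == core_correlation_segment hi) = false := by
        simpa using hcont
      have hnand : ¬ (a = hi + 1 ∧ core_correlation_segment a = core_correlation_segment hi) := by
        simpa [Bool.and_eq_true, beq_iff_eq] using hcont
      have hext : extendRun hi (a :: rest) = (hi, a :: rest) := by simp [extendRun, hcf]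
      have hcnd : (!this.isEmpty &&
          (core_correlation_segment a != core_correlation_segment hi || a != hi + 1)) = true := by
        have h5 : (!this.isEmpty) = true := by simp [hne]
        rw [h5, Bool.true_and]
        rcases not_and_or.mp hnand with h' | h' <;> simp [h']
      rw [hcnd, if_pos rfl]
      rw [ih _ _ _ _ ⟨by simp, by simp, le_refl a, by simp⟩, hext]
      conv_rhs => rw [groupsB]
      rw [emitRun_eq_fmt this lo hi ⟨h1, h2, h3, h4⟩]
      simp [List.append_assoc]

theorem loop2_nil_buf (ys : List Int) (res : List String) :
    loop2 ys res [] = res ++ groupsB ys := by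
  cases ys with
  | nil => simp [loop2, groupsB]
  | cons a rest =>
    simp only [loop2, List.isEmpty_nil, Bool.not_true, Bool.false_and, Bool.false_eq_true,
      if_false, List.nil_append]
    rw [loop2_run rest res a a [a] ⟨by simp, by simp, le_refl _, by simp⟩]
    conv_rhs => rw [groupsB]

-- ===== VERDICT (by name: the statement is the Claim_ definition above) =====
theorem element_ranges_spec : Claim_equal_element_ranges := by
  intro elements heavy light _ _
  unfold Spec_element_ranges element_ranges element_ranges_alt
  cases elements.mapM atomic_number? with
  | none => rfl
  | some ans =>
    simp only
    rw [eraLoop_eq_loop2, loop2_nil_buf]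
    simp
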